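-- pv_equiv track=rewrite | github.com/arieshsieh0402/LeetCode-Practice | 2262_total_appeal_of_a_string.py | appeal_sum_brute_imp
-- ===== SOURCE A (Python) =====
-- from string import ascii_lowercase
--
-- def appeal_sum_brute_imp(s: str) -> int:
--     def check_char_appeal(sub_string):
--         appeal_char_dict = {char: False for char in ascii_lowercase}
--         char_remain = 26
--
--         for char in sub_string:
--             if not appeal_char_dict[char]:
--                 appeal_char_dict[char] = True
--                 char_remain -= 1
--             if char_remain == 0:
--                 break
--
--         return len([key for key, val in appeal_char_dict.items() if val])
--
--     result = 0
--
--     for i in range(len(s)):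
--         for j in range(i, len(s)):
--             sub_string = s[i:j + 1]
--             result += check_char_appeal(sub_string)
--
--     return result
-- ===== SOURCE B (Python) =====
-- from string import ascii_lowercase
--
-- def appeal_sum_brute_imp(s: str) -> int:
--     # O(n) last-occurrence DP: cur = total appeal of the substrings ending at i.
--     last = {char: -1 for char in ascii_lowercase}
--     cur = 0
--     total = 0
--     for i, ch in enumerate(s):
--         cur += i - last[ch]
--         last[ch] = i
--         total += cur
--     return total
-- ===== Notes on version B (the rewrite author's own statement) =====
-- stated objective: faster
-- what changed: Replaces A's enumeration of all O(n^2) substrings each rescanned with a 26-key dict by a single pass that keeps, per position, the appeal of all substrings ending there via each character's last-occurrence index.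
import Mathlib
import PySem

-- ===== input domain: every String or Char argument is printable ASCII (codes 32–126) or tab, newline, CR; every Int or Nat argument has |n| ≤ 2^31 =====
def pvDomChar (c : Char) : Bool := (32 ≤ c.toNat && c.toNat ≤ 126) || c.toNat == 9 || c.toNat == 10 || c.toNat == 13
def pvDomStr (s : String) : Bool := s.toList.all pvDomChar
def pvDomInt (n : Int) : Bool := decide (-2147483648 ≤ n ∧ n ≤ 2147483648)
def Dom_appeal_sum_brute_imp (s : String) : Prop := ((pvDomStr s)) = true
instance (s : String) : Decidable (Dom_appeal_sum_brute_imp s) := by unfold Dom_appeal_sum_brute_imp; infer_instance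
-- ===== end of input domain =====

-- B replaces A's cubic brute force over all substrings by the O(n) per-position
-- last-occurrence DP; the equivalence proved is about the return value (neither mutates input).

-- ===== PORT A =====
def pvAscii : List Char :=
  ['a','b','c','d','e','f','g','h','i','j','k','l','m',
   'n','o','p','q','r','s','t','u','v','w','x','y','z']
def pvInitDict : PySem.Dict Char Bool :=
  pvAscii.foldl (fun d c => d.insert c false) PySem.Dict.empty
def pvCheckLoop : List Char → PySem.Dict Char Bool → Int → PySem.Dict Char Bool × Int
  | [], d, r => (d, r)
  | c :: rest, d, r =>
    let p := if d.getD c false = false then (d.insert c true, r - 1) else (d, r)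
    if p.2 = 0 then p else pvCheckLoop rest p.1 p.2
def pvCheck (sub : List Char) : Int :=
  (((pvCheckLoop sub pvInitDict 26).1.items.filter (fun kv => kv.2)).length : Int)

def appeal_sum_brute_imp (s : String) : Int :=
  (PySem.List.pyRange 0 (s.toList.length : Int)).foldl (fun result i =>
    (PySem.List.pyRange i (s.toList.length : Int)).foldl (fun result j =>
      result + pvCheck (PySem.List.slice s.toList (some i) (some (j + 1)))) result) 0

-- ===== PORT B =====
def pvInitLast : PySem.Dict Char Int :=
  pvAscii.foldl (fun d c => d.insert c (-1)) PySem.Dict.empty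

-- B's `last[ch]` raises KeyError on a non-lowercase char exactly as A does:
-- ported as getD, exact under Pre_ (lowercase strings only)
def appeal_sum_brute_imp_alt (s : String) : Int :=
  ((PySem.List.enumerate s.toList).foldl
    (fun (st : PySem.Dict Char Int × Int × Int) (p : Int × Char) =>
      let cur := st.2.1 + p.1 - st.1.getD p.2 (-1)
      (st.1.insert p.2 p.1, cur, st.2.2 + cur))
    (pvInitLast, 0, 0)).2.2

-- ===== PRECONDITION & SPEC =====
-- Pre_ excludes exactly the strings containing a non-lowercase character: on those A raises
-- KeyError (its per-substring dict only has keys 'a'..'z'), so A returns on no excluded input.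
def Pre_appeal_sum_brute_imp (s : String) : Prop :=
  (s.toList.all (fun c => pvAscii.contains c)) = true
instance (s : String) : Decidable (Pre_appeal_sum_brute_imp s) := by
  unfold Pre_appeal_sum_brute_imp; infer_instance

def pvWitness_appeal_sum_brute_imp : String := "abcba"

def Spec_appeal_sum_brute_imp (s : String) (out : Int) : Prop := out = appeal_sum_brute_imp_alt s
instance (s : String) (out : Int) : Decidable (Spec_appeal_sum_brute_imp s out) := by
  unfold Spec_appeal_sum_brute_imp; infer_instance

-- ===== CLAIM (what is proved, stated in full; the proofs are below) =====
def Claim_equal_appeal_sum_brute_imp : Prop := ∀ (s : String), Dom_appeal_sum_brute_imp s → Pre_appeal_sum_brute_imp s → Spec_appeal_sum_brute_imp s (appeal_sum_brute_imp s)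

-- ===== LEMMAS AND PROOFS =====
def pvDc (t : List Char) : Int := (t.toFinset.card : Int)
def pvLast : List Char → Char → Int
  | [], _ => -1
  | a :: t, c =>
    if pvLast t c ≥ 0 then pvLast t c + 1 else if a = c then 0 else -1

lemma pvDc_append_singleton (u : List Char) (c : Char) :
    pvDc (u ++ [c]) = pvDc u + (if c ∈ u then 0 else 1) := by
  have h1 : (u ++ [c]).toFinset = insert c u.toFinset := by
    simp
  by_cases h : c ∈ u
  · rw [pvDc, pvDc, h1, Finset.insert_eq_self.mpr (by simpa using h)]
    simp [h]
  · rw [pvDc, pvDc, h1, Finset.card_insert_of_notMem (by simpa using h)]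
    simp [h]

lemma pvLast_lb (t : List Char) (c : Char) : -1 ≤ pvLast t c := by
  induction t with
  | nil => simp [pvLast]
  | cons a t ih => simp only [pvLast]; split_ifs <;> omega

lemma pvLast_lt (t : List Char) (c : Char) : pvLast t c < (t.length : Int) := by
  induction t with
  | nil => simp [pvLast]
  | cons a t ih => simp only [pvLast, List.length_cons]; split_ifs <;> push_cast <;> omega

lemma pvMem_drop_iff (t : List Char) (c : Char) (i : ℕ) :
    c ∈ t.drop i ↔ (i : Int) ≤ pvLast t c := by
  induction t generalizing i with
  | nil => simp [pvLast]; omega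
  | cons a t ih =>
    cases i with
    | zero =>
      have hm : c ∈ t ↔ (0:Int) ≤ pvLast t c := by simpa using ih 0
      have hlb := pvLast_lb t c
      simp only [List.drop_zero, List.mem_cons, pvLast, Nat.cast_zero]
      by_cases hct : c ∈ t
      · have := hm.mp hct
        split_ifs <;> simp [hct] <;> omega
      · have hn : ¬ (0:Int) ≤ pvLast t c := fun h => hct (hm.mpr h)
        split_ifs with h1 h2
        · omega
        · subst h2; simp [hct]
        · constructor
          · rintro (rfl | h)
            · exact absurd rfl h2
            · exact absurd h hct
          · intro h; omega
    | succ i' =>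
      simp only [List.drop_succ_cons, pvLast]
      rw [ih i']
      have := pvLast_lb t c
      split_ifs with h1 h2 <;> push_cast <;> omega

lemma pvLast_append (t : List Char) (c c' : Char) :
    pvLast (t ++ [c]) c' = if c' = c then (t.length : Int) else pvLast t c' := by
  induction t with
  | nil =>
    simp only [List.nil_append, pvLast, List.length_nil, Nat.cast_zero]
    split_ifs with h1 h2 h3 <;> simp_all
  | cons a t ih =>
    simp only [List.cons_append, pvLast, ih, List.length_cons]
    have := pvLast_lb t c'
    by_cases h : c' = c <;> split_ifs <;> simp_all

lemma pvCountSum (n : ℕ) (L : Int) (h1 : -1 ≤ L) (h2 : L < (n : Int)) :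
    ((List.range n).map (fun i : ℕ => if (i : Int) ≤ L then (0 : Int) else 1)).sum
      = (n : Int) - 1 - L := by
  induction n with
  | zero => simp at h2 ⊢; omega
  | succ m ih =>
    rw [List.range_succ, List.map_append, List.sum_append]
    by_cases hL : L = (m : Int)
    · subst hL
      have : ∀ i ∈ List.range m, (if (i:Int) ≤ (m:Int) then (0:Int) else 1) = 0 := by
        intro i hi; simp only [List.mem_range] at hi
        rw [if_pos (by omega)]
      rw [List.map_congr_left this]
      simp
    · have hLm : L < (m : Int) := by push_cast at h2; omega
      rw [ih hLm]
      simp only [List.map_cons, List.map_nil, List.sum_cons, List.sum_nil]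
      have : ¬ ((m:Int) ≤ L) := by omega
      simp [this]
      ring

def pvG (u : List Char) : Int :=
  ((List.range u.length).map (fun i => pvDc (u.drop i))).sum
def pvT (u : List Char) : Int :=
  ((List.range u.length).map (fun j => pvG (u.take (j + 1)))).sum
def pvFA (cs : List Char) : Int :=
  ((List.range cs.length).map (fun i =>
    ((List.range (cs.length - i)).map (fun d => pvDc ((cs.drop i).take (d + 1)))).sum)).sum

lemma pvSumAdd (l : List ℕ) (f g : ℕ → Int) :
    (l.map (fun i => f i + g i)).sum = (l.map f).sum + (l.map g).sum := by
  induction l with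
  | nil => simp
  | cons a l ih => simp [ih]; ring

lemma pvG_append (t : List Char) (c : Char) :
    pvG (t ++ [c]) = pvG t + (t.length : Int) - pvLast t c := by
  have hlb := pvLast_lb t c
  have hlt := pvLast_lt t c
  unfold pvG
  rw [List.length_append, List.length_singleton, List.range_succ, List.map_append,
    List.sum_append]
  have hmap : ∀ i ∈ List.range t.length,
      pvDc ((t ++ [c]).drop i)
        = pvDc (t.drop i) + (if (i : Int) ≤ pvLast t c then (0:Int) else 1) := by
    intro i hi
    simp only [List.mem_range] at hi
    rw [List.drop_append_of_le_length (by omega), pvDc_append_singleton]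
    by_cases h : c ∈ t.drop i
    · rw [if_pos h, if_pos ((pvMem_drop_iff t c i).mp h)]
    · rw [if_neg h, if_neg (fun hc => h ((pvMem_drop_iff t c i).mpr hc))]
  rw [List.map_congr_left hmap]
  rw [pvSumAdd (List.range t.length) (fun i => pvDc (t.drop i))
      (fun i => if (i : Int) ≤ pvLast t c then (0:Int) else 1),
    pvCountSum t.length (pvLast t c) hlb hlt]
  simp [pvDc, List.toFinset_cons]
  ring

lemma pvT_append (t : List Char) (c : Char) :
    pvT (t ++ [c]) = pvT t + pvG (t ++ [c]) := by
  unfold pvT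
  rw [List.length_append, List.length_singleton, List.range_succ, List.map_append,
    List.sum_append]
  have hmap : ∀ j ∈ List.range t.length,
      pvG ((t ++ [c]).take (j + 1)) = pvG (t.take (j + 1)) := by
    intro j hj
    simp only [List.mem_range] at hj
    rw [List.take_append_of_le_length (by omega)]
  rw [List.map_congr_left hmap]
  simp only [List.map_cons, List.map_nil, List.sum_cons, List.sum_nil, add_zero]
  rw [List.take_of_length_le (by simp)]

lemma pvFA_append (t : List Char) (c : Char) :
    pvFA (t ++ [c]) = pvFA t + pvG (t ++ [c]) := by
  unfold pvFA pvG
  rw [List.length_append, List.length_singleton, List.range_succ, List.map_append,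
    List.sum_append]
  have houter : ∀ i ∈ List.range t.length,
      ((List.range (t.length + 1 - i)).map
        (fun d => pvDc (((t ++ [c]).drop i).take (d + 1)))).sum
        = ((List.range (t.length - i)).map (fun d => pvDc ((t.drop i).take (d + 1)))).sum
          + pvDc ((t ++ [c]).drop i) := by
    intro i hi
    simp only [List.mem_range] at hi
    have hdl : (t.drop i).length = t.length - i := by simp
    rw [show t.length + 1 - i = (t.length - i) + 1 by omega, List.range_succ,
      List.map_append, List.sum_append]
    have h1 : List.map (fun d => pvDc (((t ++ [c]).drop i).take (d + 1)))
        (List.range (t.length - i))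
        = List.map (fun d => pvDc ((t.drop i).take (d + 1))) (List.range (t.length - i)) := by
      apply List.map_congr_left
      intro d hd
      simp only [List.mem_range] at hd
      rw [List.drop_append_of_le_length (by omega),
        List.take_append_of_le_length (by omega)]
    rw [h1]
    simp only [List.map_cons, List.map_nil, List.sum_cons, List.sum_nil, add_zero]
    rw [List.take_of_length_le (by rw [List.length_drop, List.length_append]; simp; omega)]
  rw [List.map_congr_left houter,
    pvSumAdd (List.range t.length)
      (fun i => ((List.range (t.length - i)).map (fun d => pvDc ((t.drop i).take (d + 1)))).sum)
      (fun i => pvDc ((t ++ [c]).drop i))]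
  simp only [List.map_append, List.sum_append, List.map_cons, List.map_nil,
    List.sum_cons, List.sum_nil, add_zero]
  have h2 : (List.range (t.length + 1 - t.length)).map
      (fun d => pvDc (((t ++ [c]).drop t.length).take (d + 1))) = [pvDc [c]] := by
    rw [show t.length + 1 - t.length = 1 by omega]
    simp [List.range_succ]
  rw [h2]
  have h3 : (t ++ [c]).drop t.length = [c] := by
    simp
  rw [h3]
  simp
  ring


lemma pvAscii_nodup : pvAscii.Nodup := by decide

lemma pvCard_le (S : Finset Char) (hS : ∀ c ∈ S, c ∈ pvAscii) : S.card ≤ 26 := by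
  have h : S ⊆ pvAscii.toFinset := fun c hc => List.mem_toFinset.mpr (hS c hc)
  have := Finset.card_le_card h
  have h26 : pvAscii.toFinset.card = 26 := by decide
  omega

lemma pvUnion_of_full (S T : Finset Char) (hS : ∀ c ∈ S, c ∈ pvAscii)
    (hT : ∀ c ∈ T, c ∈ pvAscii) (h : S.card = 26) : S ∪ T = S := by
  have hSsub : S ⊆ pvAscii.toFinset := fun c hc => List.mem_toFinset.mpr (hS c hc)
  have hfull : S = pvAscii.toFinset := by
    apply Finset.eq_of_subset_of_card_le hSsub
    have h26 : pvAscii.toFinset.card = 26 := by decide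
    omega
  apply Finset.union_eq_left.mpr
  intro c hc
  rw [hfull]
  exact List.mem_toFinset.mpr (hT c hc)

lemma pvItems_state (S : Finset Char) (d : PySem.Dict Char Bool)
    (hd : d.items = pvAscii.map (fun k => (k, decide (k ∈ S)))) (c : Char)
    (hc : c ∈ pvAscii) :
    d.getD c false = decide (c ∈ S) ∧
    (d.insert c true).items = pvAscii.map (fun k => (k, decide (k ∈ insert c S))) := by
  have hkeys : d.keys = pvAscii := by
    simp only [PySem.Dict.keys, hd, List.map_map]
    exact List.map_id pvAscii
  have hnd : d.keys.Nodup := by rw [hkeys]; exact pvAscii_nodup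
  constructor
  · apply PySem.Dict.getD_of_mem_items d _ hnd
    rw [hd]
    exact List.mem_map.mpr ⟨c, hc, rfl⟩
  · have hcont : d.contains c = true := by
      rw [PySem.Dict.contains_iff_mem_keys, hkeys]; exact hc
    rw [PySem.Dict.items_insert_of_contains d true hcont, hd, List.map_map]
    apply List.map_congr_left
    intro k hk
    by_cases hkc : k = c
    · subst hkc; simp
    · simp [Function.comp, hkc, Finset.mem_insert]

lemma pvLoop_nil_aux (S : Finset Char) (hS : ∀ c ∈ S, c ∈ pvAscii)
    (d : PySem.Dict Char Bool)
    (hd : d.items = pvAscii.map (fun k => (k, decide (k ∈ S)))) :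
    ((d.items.filter (fun kv => kv.2)).length : Int) = (S.card : Int) := by
  rw [hd, List.filter_map]
  rw [List.length_map]
  show ((List.filter (fun k : Char => decide (k ∈ S)) pvAscii).length : Int) = (S.card : Int)
  have hnd : (pvAscii.filter (fun k => decide (k ∈ S))).Nodup := pvAscii_nodup.filter _
  rw [← List.toFinset_card_of_nodup hnd, List.toFinset_filter]
  congr 2
  ext x
  simp only [Finset.mem_filter, List.mem_toFinset, decide_eq_true_eq]
  exact ⟨fun h => h.2, fun h => ⟨hS x h, h⟩⟩

lemma pvLoop_spec (sub : List Char) (hsub : ∀ c ∈ sub, c ∈ pvAscii)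
    (S : Finset Char) (hS : ∀ c ∈ S, c ∈ pvAscii) (d : PySem.Dict Char Bool)
    (hd : d.items = pvAscii.map (fun k => (k, decide (k ∈ S)))) :
    (((pvCheckLoop sub d (26 - (S.card : Int))).1.items.filter (fun kv => kv.2)).length : Int)
      = ((S ∪ sub.toFinset).card : Int) := by
  induction sub generalizing S d with
  | nil =>
    simp only [pvCheckLoop, List.toFinset_nil, Finset.union_empty]
    exact pvLoop_nil_aux S hS d hd
  | cons c rest ih =>
    have hc : c ∈ pvAscii := hsub c List.mem_cons_self
    have hrest : ∀ x ∈ rest, x ∈ pvAscii := fun x hx => hsub x (List.mem_cons_of_mem c hx)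
    obtain ⟨hget, hins⟩ := pvItems_state S d hd c hc
    have hcard := pvCard_le S hS
    have hsubascii : ∀ x ∈ (c :: rest).toFinset, x ∈ pvAscii :=
      fun x hx => hsub x (List.mem_toFinset.mp hx)
    by_cases hmem : c ∈ S
    · have hcond : (decide (c ∈ S) = false) = False := by simp [hmem]
      simp only [pvCheckLoop, hget, hcond, if_false]
      by_cases hz : (26 : Int) - (S.card : Int) = 0
      · rw [if_pos hz]
        have h26 : S.card = 26 := by omega
        rw [pvUnion_of_full S (c :: rest).toFinset hS hsubascii h26]
        exact pvLoop_nil_aux S hS d hd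
      · rw [if_neg hz]
        have hU : S ∪ (c :: rest).toFinset = S ∪ rest.toFinset := by
          rw [List.toFinset_cons, Finset.union_insert,
            Finset.insert_eq_self.mpr (Finset.mem_union_left _ hmem)]
        rw [hU]
        exact ih hrest S hS d hd
    · have hcond : (decide (c ∈ S) = false) = True := by simp [hmem]
      simp only [pvCheckLoop, hget, hcond, if_true]
      have hins_card : (insert c S).card = S.card + 1 :=
        Finset.card_insert_of_notMem hmem
      have hS' : ∀ x ∈ insert c S, x ∈ pvAscii := by
        intro x hx
        rcases Finset.mem_insert.mp hx with rfl | hx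
        · exact hc
        · exact hS x hx
      have hU : S ∪ (c :: rest).toFinset = insert c S ∪ rest.toFinset := by
        rw [List.toFinset_cons, Finset.union_insert, Finset.insert_union]
      have harith : (26 : Int) - (S.card : Int) - 1 = 26 - ((insert c S).card : Int) := by
        rw [hins_card]; push_cast; ring
      by_cases hz : (26 : Int) - (S.card : Int) - 1 = 0
      · rw [if_pos hz]
        have h26 : (insert c S).card = 26 := by omega
        rw [hU, pvUnion_of_full (insert c S) rest.toFinset hS'
          (fun x hx => hsub x (List.mem_cons_of_mem c (List.mem_toFinset.mp hx))) h26]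
        exact pvLoop_nil_aux (insert c S) hS' (d.insert c true) hins
      · rw [if_neg hz]
        rw [hU, harith]
        exact ih hrest (insert c S) hS' (d.insert c true) hins

lemma pvCheck_eq (sub : List Char) (hsub : ∀ c ∈ sub, c ∈ pvAscii) :
    pvCheck sub = pvDc sub := by
  have hinit : pvInitDict.items = pvAscii.map (fun k => (k, decide (k ∈ (∅ : Finset Char)))) := by
    unfold pvInitDict
    rw [PySem.Dict.items_foldl_insert_fresh pvAscii (fun c => c) (fun _ => false)
      PySem.Dict.empty (by intro a _; simp [PySem.Dict.contains_empty]) (by simpa using pvAscii_nodup)]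
    simp [PySem.Dict.empty]
  have h := pvLoop_spec sub hsub ∅ (by simp) pvInitDict hinit
  simpa [pvCheck, pvDc] using h

lemma pvPortA_eq (s : String) (hs : ∀ c ∈ s.toList, c ∈ pvAscii) :
    appeal_sum_brute_imp s = pvFA s.toList := by
  unfold appeal_sum_brute_imp pvFA
  have hfun : (fun (result : Int) (i : Int) =>
      (PySem.List.pyRange i (s.toList.length : Int)).foldl
        (fun result j => result + pvCheck (PySem.List.slice s.toList (some i) (some (j + 1))))
        result)
      = fun (result : Int) (i : Int) => result +
          ((PySem.List.pyRange i (s.toList.length : Int)).map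
            (fun j => pvCheck (PySem.List.slice s.toList (some i) (some (j + 1))))).sum := by
    funext result i
    exact PySem.List.foldl_add _ _ _
  rw [hfun, PySem.List.foldl_add, zero_add, PySem.List.pyRange_one, List.map_map]
  have h0 : ((s.toList.length : Int) - 0).toNat = s.toList.length := by omega
  rw [h0]
  apply congrArg List.sum
  apply List.map_congr_left
  intro k hk
  simp only [List.mem_range] at hk
  simp only [Function.comp]
  rw [PySem.List.pyRange_one, List.map_map]
  have h1 : ((s.toList.length : Int) - (0 + (k : Int))).toNat = s.toList.length - k := by
    omega
  rw [h1]
  apply congrArg List.sum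
  apply List.map_congr_left
  intro d hd
  simp only [List.mem_range] at hd
  simp only [Function.comp]
  have h2 : (0 + (k:Int)) + (d:Int) + 1 = ((k + (d + 1) : Nat) : Int) := by push_cast; ring
  have h3 : (0 + (k:Int)) = ((k : Nat) : Int) := by ring
  rw [h2, h3, PySem.List.slice_natCast]
  have h4 : k + (d + 1) - k = d + 1 := by omega
  rw [h4]
  apply pvCheck_eq
  intro c hc
  exact hs c (List.mem_of_mem_drop (List.mem_of_mem_take hc))

lemma pvEnum_append (xs : List Char) (x : Char) (a : Int) :
    PySem.List.enumerate (xs ++ [x]) a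
      = PySem.List.enumerate xs a ++ [(a + xs.length, x)] := by
  induction xs generalizing a with
  | nil => simp [PySem.List.enumerate_nil, PySem.List.enumerate_cons]
  | cons y ys ih =>
    rw [List.cons_append, PySem.List.enumerate_cons, PySem.List.enumerate_cons, ih]
    simp only [List.cons_append, List.length_cons]
    congr 2
    push_cast
    ring_nf

lemma pvPortB_fold (u : List Char) :
    ∃ dct : PySem.Dict Char Int,
      ((PySem.List.enumerate u).foldl
        (fun (st : PySem.Dict Char Int × Int × Int) (p : Int × Char) =>
          let cur := st.2.1 + p.1 - st.1.getD p.2 (-1)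
          (st.1.insert p.2 p.1, cur, st.2.2 + cur))
        (pvInitLast, 0, 0)) = (dct, pvG u, pvT u)
      ∧ ∀ c, dct.getD c (-1) = pvLast u c := by
  induction u using List.reverseRecOn with
  | nil =>
    refine ⟨pvInitLast, ?_, ?_⟩
    · simp [PySem.List.enumerate_nil, pvG, pvT]
    · intro c
      show pvInitLast.getD c (-1) = pvLast [] c
      have hitems : pvInitLast.items = pvAscii.map (fun k => (k, (-1 : Int))) := by
        unfold pvInitLast
        rw [PySem.Dict.items_foldl_insert_fresh pvAscii (fun c => c) (fun _ => (-1 : Int))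
          PySem.Dict.empty (by intro a _; simp [PySem.Dict.contains_empty])
          (by simpa using pvAscii_nodup)]
        simp [PySem.Dict.empty]
      have hkeys : pvInitLast.keys = pvAscii := by
        simp only [PySem.Dict.keys, hitems, List.map_map]
        exact List.map_id pvAscii
      by_cases hc : c ∈ pvAscii
      · rw [PySem.Dict.getD_of_mem_items pvInitLast
          (by rw [hitems]; exact List.mem_map.mpr ⟨c, hc, rfl⟩) (hkeys ▸ pvAscii_nodup)]
        rfl
      · have hnc : pvInitLast.contains c = false := by
          rw [PySem.Dict.contains_eq_decide_mem_keys, hkeys]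
          simpa using hc
        rw [PySem.Dict.getD_of_not_contains _ _ hnc]
        rfl
  | append_singleton t c ih =>
    obtain ⟨dct, heq, hget⟩ := ih
    refine ⟨dct.insert c (t.length : Int), ?_, ?_⟩
    · rw [pvEnum_append, List.foldl_append, heq]
      simp only [zero_add]
      have hcur : pvG t + (t.length : Int) - dct.getD c (-1) = pvG (t ++ [c]) := by
        rw [hget c, pvG_append]
      rw [show (PySem.List.enumerate t 0) = PySem.List.enumerate t from rfl] at *
      simp only [List.foldl_cons, List.foldl_nil]
      rw [hcur]  -- may need beta
      rw [pvT_append]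
    · intro c'
      rw [PySem.Dict.getD_insert, pvLast_append]
      by_cases h : c' = c <;> simp [h, hget c']

lemma pvPortB_eq (s : String) : appeal_sum_brute_imp_alt s = pvT s.toList := by
  obtain ⟨dct, heq, -⟩ := pvPortB_fold s.toList
  unfold appeal_sum_brute_imp_alt
  rw [heq]

lemma pvFA_eq_T (u : List Char) : pvFA u = pvT u := by
  induction u using List.reverseRecOn with
  | nil => rfl
  | append_singleton t c ih => rw [pvFA_append, pvT_append, ih]

-- ===== VERDICT (by name: the statement is the Claim_ definition above) =====
theorem appeal_sum_brute_imp_spec : Claim_equal_appeal_sum_brute_imp := by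
  intro s _ hpre
  unfold Spec_appeal_sum_brute_imp
  have hs : ∀ c ∈ s.toList, c ∈ pvAscii := by
    intro c hc
    simpa using List.all_eq_true.mp hpre c hc
  rw [pvPortA_eq s hs, pvPortB_eq, pvFA_eq_T]
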